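-- pv_equiv track=rewrite | github.com/temeddix/interview-practice | baekjoon/1450.py | count_options
-- ===== SOURCE A (Python) =====
-- def count_possible_sums(items: list[int], capacity: int) -> list[int]:
--     if not items:
--         return [0]
--
--     first_item = items[0]
--     possible_sums: list[int] = []
--
--     new_sums = count_possible_sums(items[1:], capacity)
--     possible_sums.extend(new_sums)
--     for new_sum in new_sums:
--         added_sum = new_sum + first_item
--         if added_sum <= capacity:
--             possible_sums.append(added_sum)
--
--     return possible_sums
--
-- MIN_ITEMS_TO_SPLIT = 2
--
-- SumOption = tuple[
--     int,  # Sum value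
--     int,  # Option count
-- ]
--
-- def count_options(items: list[int], capacity: int) -> int:
--     if len(items) < MIN_ITEMS_TO_SPLIT:
--         return len(count_possible_sums(items, capacity))
--
--     mid = len(items) // 2 + 1
--     items_a = items[:mid]
--     items_b = items[mid:]
--
--     possible_sums_a = count_possible_sums(items_a, capacity)
--     possible_sums_b = count_possible_sums(items_b, capacity)
--     possible_sums_a.sort()
--     possible_sums_b.sort()
--
--     sum_options_a: list[SumOption] = []
--     for sum_value in possible_sums_a:
--         if sum_options_a and sum_options_a[-1][0] == sum_value:
--             last_option = sum_options_a[-1]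
--             sum_options_a.pop()
--             sum_options_a.append((last_option[0], last_option[1] + 1))
--         else:
--             sum_options_a.append((sum_value, 1))
--     sum_options_b: list[SumOption] = []
--     for sum_value in possible_sums_b:
--         if sum_options_b and sum_options_b[-1][0] == sum_value:
--             last_option = sum_options_b[-1]
--             sum_options_b.pop()
--             sum_options_b.append((last_option[0], last_option[1] + 1))
--         else:
--             sum_options_b.append((sum_value, 1))
--
--     options = 0
--     for sum_option_a in sum_options_a:
--         for sum_option_b in sum_options_b:
--             if sum_option_a[0] + sum_option_b[0] <= capacity:
--                 options += sum_option_a[1] * sum_option_b[1]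
--
--     return options
-- ===== SOURCE B (Python) =====
-- def count_options(items: list[int], capacity: int) -> int:
--     def reachable_sums(part: list[int]) -> list[int]:
--         # iterative subset-sum enumeration (processing elements back to front),
--         # keeping only sums that stay within capacity when an element is added
--         sums = [0]
--         for item in reversed(part):
--             sums += [s + item for s in sums if s + item <= capacity]
--         return sums
--
--     if len(items) < 2:
--         return len(reachable_sums(items))
--
--     mid = len(items) // 2 + 1
--     sums_a = sorted(reachable_sums(items[:mid]), reverse=True)
--     sums_b = sorted(reachable_sums(items[mid:]))
--
--     # two-pointer sweep: sums_a descending, so the cutoff in sums_b only moves right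
--     total = 0
--     j = 0
--     for a in sums_a:
--         while j < len(sums_b) and sums_b[j] <= capacity - a:
--             j += 1
--         total += j
--     return total
-- ===== Notes on version B (the rewrite author's own statement) =====
-- stated objective: alternative
-- what changed: The half-sum lists are built iteratively instead of recursively, and the nested loop over all pairs of run-length-grouped sums is replaced by a two-pointer sweep over the two sorted half-sum lists; intended as faster (fewer pair comparisons) but a timing run could not confirm it (1.45x at the largest size both finished), so no speed is claimed.
import Mathlib
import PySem

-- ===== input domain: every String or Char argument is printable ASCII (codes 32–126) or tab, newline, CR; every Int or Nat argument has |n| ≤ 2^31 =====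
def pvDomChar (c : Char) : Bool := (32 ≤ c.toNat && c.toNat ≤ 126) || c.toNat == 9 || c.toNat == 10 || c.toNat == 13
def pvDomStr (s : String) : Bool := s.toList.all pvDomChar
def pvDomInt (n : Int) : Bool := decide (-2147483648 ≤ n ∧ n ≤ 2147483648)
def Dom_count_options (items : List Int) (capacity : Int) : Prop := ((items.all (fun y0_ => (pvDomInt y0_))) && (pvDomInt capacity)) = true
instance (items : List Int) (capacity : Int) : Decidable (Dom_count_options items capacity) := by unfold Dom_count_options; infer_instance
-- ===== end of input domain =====

-- B builds the half-sum lists iteratively instead of recursively and replaces A's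
-- nested pairwise scan over the run-length-grouped sums by a sorted two-pointer sweep.

-- ===== PORT A =====
def count_possible_sums (items : List Int) (capacity : Int) : List Int :=
  match items with
  | [] => [0]
  | first_item :: rest =>
    let new_sums := count_possible_sums rest capacity
    new_sums.foldl (fun acc new_sum =>
      let added_sum := new_sum + first_item
      if added_sum ≤ capacity then acc ++ [added_sum] else acc) new_sums

-- one step of A's run-length grouping loop ('if sum_options and sum_options[-1][0] == sum_value: …')
def rleStep (acc : List (Int × Int)) (sum_value : Int) : List (Int × Int) :=
  match acc.getLast? with
  | some last =>
    if last.1 = sum_value then acc.dropLast ++ [(last.1, last.2 + 1)]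
    else acc ++ [(sum_value, 1)]
  | none => acc ++ [(sum_value, 1)]

def count_options (items : List Int) (capacity : Int) : Int :=
  if PySem.List.len items < 2 then PySem.List.len (count_possible_sums items capacity)
  else
    let mid := PySem.Int.floordiv (PySem.List.len items) 2 + 1
    let items_a := PySem.List.slice items none (some mid)
    let items_b := PySem.List.slice items (some mid) none
    let possible_sums_a := PySem.List.sorted (count_possible_sums items_a capacity) (fun x => x) false
    let possible_sums_b := PySem.List.sorted (count_possible_sums items_b capacity) (fun x => x) false
    let sum_options_a := possible_sums_a.foldl rleStep []
    let sum_options_b := possible_sums_b.foldl rleStep []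
    sum_options_a.foldl (fun options sum_option_a =>
      sum_options_b.foldl (fun options sum_option_b =>
        if sum_option_a.1 + sum_option_b.1 ≤ capacity then
          options + sum_option_a.2 * sum_option_b.2
        else options) options) 0

-- ===== PORT B =====
def reachable_sums (part : List Int) (capacity : Int) : List Int :=
  part.reverse.foldl (fun sums item =>
    sums ++ (sums.filter (fun s => s + item ≤ capacity)).map (fun s => s + item)) [0]

-- B's inner 'while j < len(sums_b) and sums_b[j] <= capacity - a: j += 1'
def advancePtr (sums_b : List Int) (t : Int) (j : Nat) : Nat :=
  if h : j < sums_b.length then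
    if sums_b[j] ≤ t then advancePtr sums_b t (j + 1) else j
  else j
termination_by sums_b.length - j

def count_options_alt (items : List Int) (capacity : Int) : Int :=
  if PySem.List.len items < 2 then PySem.List.len (reachable_sums items capacity)
  else
    let mid := PySem.Int.floordiv (PySem.List.len items) 2 + 1
    let sums_a := PySem.List.sorted
      (reachable_sums (PySem.List.slice items none (some mid)) capacity) (fun x => x) true
    let sums_b := PySem.List.sorted
      (reachable_sums (PySem.List.slice items (some mid) none) capacity) (fun x => x) false
    (sums_a.foldl (fun (st : Int × Nat) a =>
      let j := advancePtr sums_b (capacity - a) st.2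
      (st.1 + (j : Int), j)) ((0 : Int), (0 : Nat))).1

-- ===== PRECONDITION & SPEC =====
def Spec_count_options (items : List Int) (capacity : Int) (out : Int) : Prop := out = count_options_alt items capacity
instance (items : List Int) (capacity : Int) (out : Int) : Decidable (Spec_count_options items capacity out) := by unfold Spec_count_options; infer_instance

-- ===== CLAIM (what is proved, stated in full; the proofs are below) =====
def Claim_equal_count_options : Prop := ∀ (items : List Int) (capacity : Int), Dom_count_options items capacity → Spec_count_options items capacity (count_options items capacity)

-- ===== LEMMAS AND PROOFS =====

-- B's iterative sum enumeration builds exactly A's recursive list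
theorem reachable_eq (part : List Int) (capacity : Int) :
    reachable_sums part capacity = count_possible_sums part capacity := by
  induction part with
  | nil => rfl
  | cons x rest ih =>
    unfold reachable_sums at *
    rw [List.reverse_cons, List.foldl_append, ih]
    simp only [List.foldl_cons, List.foldl_nil, count_possible_sums]
    rw [show (fun (acc : List Int) (new_sum : Int) =>
        let added_sum := new_sum + x
        if added_sum ≤ capacity then acc ++ [added_sum] else acc)
      = (fun (acc : List Int) (s : Int) =>
        if (fun s => decide (s + x ≤ capacity)) s = true then acc ++ [(fun s => s + x) s] else acc)
      from by funext acc s; simp]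
    rw [PySem.List.foldl_append_if (fun s => decide (s + x ≤ capacity)) (fun s => s + x)]

-- expansion of a run-length list
def expandRLE (r : List (Int × Int)) : List Int :=
  r.flatMap (fun p => List.replicate p.2.toNat p.1)

theorem rleStep_expand (r : List (Int × Int)) (v : Int) (hc : ∀ p ∈ r, 1 ≤ p.2) :
    expandRLE (rleStep r v) = expandRLE r ++ [v] ∧ ∀ p ∈ rleStep r v, 1 ≤ p.2 := by
  rcases List.eq_nil_or_concat r with h | ⟨r', last, h⟩
  · subst h
    constructor
    · rfl
    · intro p hp
      simp only [rleStep, List.getLast?_nil, List.nil_append, List.mem_singleton] at hp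
      simp [hp]
  · subst h
    simp only [List.concat_eq_append] at hc ⊢
    have hcl : 1 ≤ last.2 := hc last (by simp)
    simp only [rleStep, List.getLast?_concat, List.dropLast_concat]
    by_cases hv : last.1 = v
    · rw [if_pos hv]
      constructor
      · simp only [expandRLE, List.flatMap_append, List.flatMap_cons, List.flatMap_nil,
          List.append_nil, List.append_assoc]
        congr 1
        have h1 : (last.2 + 1).toNat = last.2.toNat + 1 := by omega
        rw [h1, List.replicate_succ', hv]
      · intro p hp
        rcases List.mem_append.1 hp with h1 | h1
        · exact hc p (List.mem_append.2 (Or.inl h1))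
        · simp only [List.mem_singleton] at h1; subst h1; simp; omega
    · rw [if_neg hv]
      constructor
      · simp [expandRLE, List.flatMap_append]
      · intro p hp
        rcases List.mem_append.1 hp with h1 | h1
        · exact hc p h1
        · simp only [List.mem_singleton] at h1; subst h1; simp

theorem rle_expand (l : List Int) :
    ∀ (r : List (Int × Int)), (∀ p ∈ r, 1 ≤ p.2) →
      expandRLE (l.foldl rleStep r) = expandRLE r ++ l ∧
      ∀ p ∈ l.foldl rleStep r, 1 ≤ p.2 := by
  induction l with
  | nil => intro r hc; exact ⟨by simp, hc⟩
  | cons v l ih =>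
    intro r hc
    obtain ⟨he, hc'⟩ := rleStep_expand r v hc
    obtain ⟨he', hc''⟩ := ih (rleStep r v) hc'
    refine ⟨?_, by simpa using hc''⟩
    simp only [List.foldl_cons]
    rw [he', he]; simp

-- Σ over a run-length list equals Σ over its expansion
theorem sum_expandRLE (r : List (Int × Int)) (f : Int → Int) (hc : ∀ p ∈ r, 1 ≤ p.2) :
    (r.map (fun p => p.2 * f p.1)).sum = ((expandRLE r).map f).sum := by
  induction r with
  | nil => rfl
  | cons p r ih =>
    simp only [expandRLE, List.map_cons, List.sum_cons, List.flatMap_cons, List.map_append,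
      List.sum_append] at ih ⊢
    rw [← ih (fun q hq => hc q (List.mem_cons_of_mem _ hq))]
    congr 1
    have h1 : 1 ≤ p.2 := hc p List.mem_cons_self
    rw [List.map_replicate, List.sum_replicate, nsmul_eq_mul]
    have h2 : ((p.2.toNat : Nat) : Int) = p.2 := by omega
    rw [h2]

-- the Int-valued pair count Σ_{a∈la} #{b∈lb | a+b ≤ cap}
def pairCount (la lb : List Int) (capacity : Int) : Int :=
  (la.map (fun a => ((lb.countP (fun b => a + b ≤ capacity)) : Int))).sum

theorem pairCount_perm {la la' lb lb' : List Int} (capacity : Int)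
    (ha : la.Perm la') (hb : lb.Perm lb') :
    pairCount la lb capacity = pairCount la' lb' capacity := by
  unfold pairCount
  have hf : (fun a => ((lb.countP (fun b => a + b ≤ capacity)) : Int))
      = (fun a => ((lb'.countP (fun b => a + b ≤ capacity)) : Int)) := by
    funext a; exact congrArg _ (hb.countP_eq _)
  rw [hf]
  exact (ha.map _).sum_eq

-- A's nested run-length loop computes pairCount of the two sorted lists
theorem nested_eq_pairCount (la lb : List Int) (capacity : Int) :
    ((la.foldl rleStep []).foldl (fun options p =>
      ((lb.foldl rleStep []).foldl (fun options q =>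
        if p.1 + q.1 ≤ capacity then options + p.2 * q.2 else options) options)) 0)
    = pairCount la lb capacity := by
  obtain ⟨hea, hca⟩ := rle_expand la [] (by simp)
  obtain ⟨heb, hcb⟩ := rle_expand lb [] (by simp)
  have hea' : expandRLE (la.foldl rleStep []) = la := by simpa [expandRLE] using hea
  have heb' : expandRLE (lb.foldl rleStep []) = lb := by simpa [expandRLE] using heb
  have inner : ∀ (p : Int × Int) (o : Int),
      (lb.foldl rleStep []).foldl (fun options q =>
        if p.1 + q.1 ≤ capacity then options + p.2 * q.2 else options) o
      = o + p.2 * ((lb.countP (fun b => p.1 + b ≤ capacity)) : Int) := by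
    intro p o
    rw [PySem.List.foldl_congr_mem' (lb.foldl rleStep []) _
      (fun options q => options + p.2 * (q.2 * (if p.1 + q.1 ≤ capacity then 1 else 0)))
      o (by intro q hq acc; by_cases h : p.1 + q.1 ≤ capacity <;> simp [h])]
    rw [PySem.List.foldl_add]
    congr 1
    rw [List.sum_map_mul_left]
    congr 1
    rw [sum_expandRLE (lb.foldl rleStep []) (fun b => if p.1 + b ≤ capacity then (1:Int) else 0) hcb,
      heb']
    rw [show (fun b => if p.1 + b ≤ capacity then (1:Int) else 0)
        = (fun b => if (fun b => decide (p.1 + b ≤ capacity)) b = true then (1:Int) else 0) from by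
      funext b; simp]
    rw [PySem.List.sum_map_ite_one_zero]
  rw [PySem.List.foldl_congr_mem' (la.foldl rleStep []) _
    (fun options p => options + p.2 * ((lb.countP (fun b => p.1 + b ≤ capacity)) : Int)) 0
    (by intro p _ acc; exact inner p acc)]
  rw [PySem.List.foldl_add]
  rw [sum_expandRLE (la.foldl rleStep [])
    (fun a => ((lb.countP (fun b => a + b ≤ capacity)) : Int)) hca, hea']
  simp [pairCount]

-- in a sorted list, an admissible index bounds the count from below
theorem sorted_getElem_mono (sb : List Int) (hs : sb.Pairwise (· ≤ ·)) {i j : Nat}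
    (hij : i ≤ j) (hj : j < sb.length) : sb[i]'(lt_of_le_of_lt hij hj) ≤ sb[j] := by
  rcases Nat.lt_or_eq_of_le hij with h | h
  · exact List.pairwise_iff_getElem.mp hs i j (lt_of_le_of_lt hij hj) hj h
  · subst h; exact le_refl _

theorem cnt_lb (sb : List Int) (hs : sb.Pairwise (· ≤ ·)) (t : Int) {j : Nat}
    (hj : j < sb.length) (h : sb[j] ≤ t) :
    j + 1 ≤ sb.countP (fun b => b ≤ t) := by
  have hsplit : sb.countP (fun b => b ≤ t)
      = (sb.take (j+1)).countP (fun b => b ≤ t) + (sb.drop (j+1)).countP (fun b => b ≤ t) := by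
    conv_lhs => rw [← List.take_append_drop (j+1) sb]
    exact List.countP_append
  have hall : ∀ b ∈ sb.take (j+1), (fun b => decide (b ≤ t)) b = true := by
    intro b hb
    obtain ⟨i, hi, hib⟩ := List.getElem_of_mem hb
    rw [List.getElem_take] at hib
    have hij : i ≤ j := by
      have := hi; simp only [List.length_take] at this; omega
    have : b ≤ sb[j] := hib ▸ sorted_getElem_mono sb hs hij hj
    simp; omega
  have hlen : (sb.take (j+1)).length = j + 1 := by
    simp only [List.length_take]; omega
  have : (sb.take (j+1)).countP (fun b => b ≤ t) = j + 1 := by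
    rw [List.countP_eq_length.mpr hall, hlen]
  omega

theorem cnt_ub (sb : List Int) (hs : sb.Pairwise (· ≤ ·)) (t : Int) {j : Nat}
    (hj : j < sb.length) (h : ¬ sb[j] ≤ t) :
    sb.countP (fun b => b ≤ t) ≤ j := by
  have hsplit : sb.countP (fun b => b ≤ t)
      = (sb.take j).countP (fun b => b ≤ t) + (sb.drop j).countP (fun b => b ≤ t) := by
    conv_lhs => rw [← List.take_append_drop j sb]
    exact List.countP_append
  have hzero : (sb.drop j).countP (fun b => b ≤ t) = 0 := by
    rw [List.countP_eq_zero]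
    intro b hb
    obtain ⟨i, hi, hib⟩ := List.getElem_of_mem hb
    rw [List.getElem_drop] at hib
    have hji : j + i < sb.length := by
      have := hi; simp only [List.length_drop] at this; omega
    have hbig : sb[j] ≤ b := hib ▸ sorted_getElem_mono sb hs (Nat.le_add_right j i) hji
    simp; omega
  have hle : (sb.take j).countP (fun b => b ≤ t) ≤ j := by
    calc (sb.take j).countP (fun b => b ≤ t) ≤ (sb.take j).length := List.countP_le_length
    _ ≤ j := by simp [List.length_take]
  omega

-- the pointer, started at or below the count, lands exactly on the count
theorem advancePtr_eq (sb : List Int) (t : Int) (j : Nat) (hs : sb.Pairwise (· ≤ ·)) :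
    j ≤ sb.countP (fun b => b ≤ t) → advancePtr sb t j = sb.countP (fun b => b ≤ t) := by
  fun_induction advancePtr sb t j with
  | case1 j h hle ih =>
    intro _
    exact ih (cnt_lb sb hs t h hle)
  | case2 j h hnle =>
    intro hj
    have := cnt_ub sb hs t h hnle
    omega
  | case3 j h =>
    intro hj
    have := List.countP_le_length (l := sb) (p := fun b => decide (b ≤ t))
    omega

-- the outer sweep accumulates the pair count
theorem sweep_eq (capacity : Int) (sb : List Int) (hsb : sb.Pairwise (· ≤ ·)) :
    ∀ (sa : List Int) (total : Int) (j : Nat),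
      sa.Pairwise (fun x y => y ≤ x) →
      (∀ a ∈ sa, j ≤ sb.countP (fun b => b ≤ capacity - a)) →
      (sa.foldl (fun (st : Int × Nat) a =>
        let j := advancePtr sb (capacity - a) st.2
        (st.1 + (j : Int), j)) (total, j)).1
      = total + (sa.map (fun a => ((sb.countP (fun b => a + b ≤ capacity)) : Int))).sum := by
  intro sa
  induction sa with
  | nil => intro total j _ _; simp
  | cons a sa ih =>
    intro total j hpw hmem
    rw [List.pairwise_cons] at hpw
    obtain ⟨hle, hpw'⟩ := hpw
    have hcnt : advancePtr sb (capacity - a) j = sb.countP (fun b => b ≤ capacity - a) :=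
      advancePtr_eq sb (capacity - a) j hsb (hmem a List.mem_cons_self)
    simp only [List.foldl_cons]
    show (sa.foldl _ (total + ((advancePtr sb (capacity - a) j : Nat) : Int),
      advancePtr sb (capacity - a) j)).1 = _
    rw [hcnt]
    rw [ih (total + ((sb.countP (fun b => b ≤ capacity - a) : Nat) : Int))
      (sb.countP (fun b => b ≤ capacity - a)) hpw'
      (by
        intro a' ha'
        apply List.countP_mono_left
        intro b _ hb
        have haa : a' ≤ a := hle a' ha'
        simp only [decide_eq_true_eq] at hb ⊢
        omega)]
    have hconv : sb.countP (fun b => b ≤ capacity - a) = sb.countP (fun b => a + b ≤ capacity) := by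
      apply List.countP_congr
      intro b _
      simp only [decide_eq_true_eq]
      omega
    rw [hconv]
    simp only [List.map_cons, List.sum_cons]
    ring

theorem count_options_eq (items : List Int) (capacity : Int) :
    count_options items capacity = count_options_alt items capacity := by
  unfold count_options count_options_alt
  by_cases h : PySem.List.len items < 2
  · simp only [if_pos h, reachable_eq]
  · simp only [if_neg h]
    rw [reachable_eq, reachable_eq]
    set mid := PySem.Int.floordiv (PySem.List.len items) 2 + 1 with hmid
    set LA := count_possible_sums (PySem.List.slice items none (some mid)) capacity with hLA
    set LB := count_possible_sums (PySem.List.slice items (some mid) none) capacity with hLB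
    have hsb : (PySem.List.sorted LB (fun x => x) false).Pairwise (· ≤ ·) := by
      have := PySem.List.sorted_pairwise LB (fun x => x)
      simpa using this
    have hsa : (PySem.List.sorted LA (fun x => x) true).Pairwise (fun x y => y ≤ x) := by
      have := PySem.List.sorted_pairwise_rev LA (fun x => x)
      simpa using this
    rw [nested_eq_pairCount (PySem.List.sorted LA (fun x => x) false)
      (PySem.List.sorted LB (fun x => x) false) capacity]
    rw [sweep_eq capacity (PySem.List.sorted LB (fun x => x) false) hsb
      (PySem.List.sorted LA (fun x => x) true) 0 0 hsa (fun a _ => Nat.zero_le _)]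
    rw [zero_add]
    show pairCount _ _ capacity = pairCount (PySem.List.sorted LA (fun x => x) true)
      (PySem.List.sorted LB (fun x => x) false) capacity
    exact pairCount_perm capacity
      ((PySem.List.sorted_perm LA (fun x => x) false).trans
        (PySem.List.sorted_perm LA (fun x => x) true).symm)
      (List.Perm.refl _)

-- ===== VERDICT (by name: the statement is the Claim_ definition above) =====
theorem count_options_spec : Claim_equal_count_options := by
  intro items capacity _
  unfold Spec_count_options
  exact count_options_eq items capacity
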